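-- pv_equiv track=rewrite | github.com/osuide/detection-coverage-validator | backend/app/data/remediation_templates/validation/fix_duplicates.py | fix_cloudformation_duplicates
-- ===== SOURCE A (Python) =====
-- def fix_cloudformation_duplicates(content: str) -> str:
--     """Remove duplicate TreatMissingData in CloudFormation templates."""
--     # Pattern to find CloudWatch Alarm resources with duplicate TreatMissingData
--     # We need to remove the second occurrence within the same resource
--
--     lines = content.split("\n")
--     result_lines = []
--     in_alarm_resource = False
--     seen_treat_missing = False
--     alarm_indent = 0
--
--     for i, line in enumerate(lines):
--         # Detect start of CloudWatch Alarm resource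
--         if "Type: AWS::CloudWatch::Alarm" in line:
--             in_alarm_resource = True
--             seen_treat_missing = False
--             # Find the indent level of Properties
--             alarm_indent = len(line) - len(line.lstrip())
--             result_lines.append(line)
--             continue
--
--         # Detect end of resource (line with same or less indentation that's not empty)
--         if in_alarm_resource and line.strip() and not line.strip().startswith("#"):
--             current_indent = len(line) - len(line.lstrip())
--             if current_indent <= alarm_indent and "Properties:" not in line:
--                 in_alarm_resource = False
--                 seen_treat_missing = False
--
--         # Check for TreatMissingData
--         if in_alarm_resource and "TreatMissingData:" in line:
--             if seen_treat_missing: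
--                 # Skip this duplicate line
--                 continue
--             seen_treat_missing = True
--
--         result_lines.append(line)
--
--     return "\n".join(result_lines)
-- ===== SOURCE B (Python) =====
-- MARK = "Type: AWS::CloudWatch::Alarm"
--
--
-- def _closes(indent, line):
--     s = line.strip()
--     return (s != "" and not s.startswith("#")
--             and len(line) - len(line.lstrip()) <= indent
--             and "Properties:" not in line)
--
--
-- def fix_cloudformation_duplicates(content: str) -> str:
--     """Remove duplicate TreatMissingData in CloudFormation templates.
--
--     Two-pass decomposition: first cut the text into plain lines and alarm
--     segments, then drop duplicate TreatMissingData lines inside each segment.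
--     """
--     lines = content.split("\n")
--     n = len(lines)
--     # pass 1: segmentation
--     segments = []  # ("plain", line) or ("alarm", header, body_lines)
--     i = 0
--     while i < n:
--         line = lines[i]
--         if MARK in line:
--             indent = len(line) - len(line.lstrip())
--             i += 1
--             body = []
--             while i < n and MARK not in lines[i] and not _closes(indent, lines[i]):
--                 body.append(lines[i])
--                 i += 1
--             segments.append(("alarm", line, body))
--         else:
--             segments.append(("plain", line, None))
--             i += 1
--     # pass 2: per-segment dedup of TreatMissingData lines
--     out = []
--     for kind, head, body in segments:
--         out.append(head)
--         if kind == "alarm":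
--             seen = False
--             for l in body:
--                 if "TreatMissingData:" in l:
--                     if seen:
--                         continue
--                     seen = True
--                 out.append(l)
--     return "\n".join(out)
-- ===== Notes on version B (the rewrite author's own statement) =====
-- stated objective: alternative
-- what changed: Replaces A's single-pass three-flag state machine with a two-pass pipeline: pass one segments the lines into plain lines and alarm blocks (an explicit inner scan delimited by the block-closing condition), pass two drops duplicate TreatMissingData lines inside each block.
import Mathlib
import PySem

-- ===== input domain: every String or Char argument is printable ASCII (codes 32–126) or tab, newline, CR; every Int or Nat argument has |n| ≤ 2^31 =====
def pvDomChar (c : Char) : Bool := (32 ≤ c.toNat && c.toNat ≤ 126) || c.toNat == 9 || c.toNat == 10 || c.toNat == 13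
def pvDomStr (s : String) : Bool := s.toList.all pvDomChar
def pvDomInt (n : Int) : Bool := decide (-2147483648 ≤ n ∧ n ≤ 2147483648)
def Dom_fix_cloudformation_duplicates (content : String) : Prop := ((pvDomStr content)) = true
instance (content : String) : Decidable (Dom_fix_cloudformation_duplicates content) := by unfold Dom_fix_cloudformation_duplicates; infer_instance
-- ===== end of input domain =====

-- B restructures A's flat state machine as two passes (segment the lines into alarm blocks, then dedup each block); same return value, objective: alternative decomposition.

-- ===== PORT A =====
-- shared string tests, exactly the Python expressions
def pvMark : String := "Type: AWS::CloudWatch::Alarm"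

-- len(line) - len(line.lstrip())
def pvIndentOf (line : String) : Int :=
  PySem.Str.len line - PySem.Str.len (PySem.Str.lstrip line)

-- the end-of-resource detection step (A's second if, updating the two flags)
def pvStep (inAlarm seen : Bool) (alarmIndent : Int) (line : String) : Bool × Bool :=
  if inAlarm && (PySem.Str.strip line != "") && !(PySem.Str.startswith (PySem.Str.strip line) "#") then
    if decide (pvIndentOf line ≤ alarmIndent) && !(PySem.Str.isIn "Properties:" line) then (false, false)
    else (inAlarm, seen)
  else (inAlarm, seen)

-- the loop of A: state (in_alarm_resource, seen_treat_missing, alarm_indent), one line per step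
def goA (inAlarm seen : Bool) (alarmIndent : Int) : List String → List String
  | [] => []
  | line :: rest =>
    if PySem.Str.isIn pvMark line then
      line :: goA true false (pvIndentOf line) rest
    else
      let st := pvStep inAlarm seen alarmIndent line
      -- TreatMissingData check
      if st.1 && PySem.Str.isIn "TreatMissingData:" line then
        if st.2 then goA st.1 st.2 alarmIndent rest
        else line :: goA st.1 true alarmIndent rest
      else line :: goA st.1 st.2 alarmIndent rest

-- content.split("\n") — the separator is non-empty, so split? always returns some
def pvSplitLines (content : String) : List String :=
  (PySem.Str.split? content "\n").getD []

def fix_cloudformation_duplicates (content : String) : String :=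
  PySem.Str.join "\n" (goA false false 0 (pvSplitLines content))

-- ===== PORT B =====
inductive PvSeg where
  | plain : String → PvSeg
  | alarm : String → List String → PvSeg
deriving DecidableEq, Repr

-- _closes(indent, line)
def pvCloses (indent : Int) (line : String) : Bool :=
  (PySem.Str.strip line != "") && !(PySem.Str.startswith (PySem.Str.strip line) "#")
    && decide (pvIndentOf line ≤ indent) && !(PySem.Str.isIn "Properties:" line)

-- inner while of pass 1: the body of an alarm block and the remaining lines
def pvTakeBlock (indent : Int) : List String → List String × List String
  | [] => ([], [])
  | l :: rest =>
    if PySem.Str.isIn pvMark l || pvCloses indent l then ([], l :: rest)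
    else
      let (b, r) := pvTakeBlock indent rest
      (l :: b, r)

theorem pvTakeBlock_rest_le (indent : Int) (ls : List String) :
    (pvTakeBlock indent ls).2.length ≤ ls.length := by
  induction ls with
  | nil => simp [pvTakeBlock]
  | cons l rest ih =>
    simp only [pvTakeBlock]
    split
    · simp
    · simpa using Nat.le_succ_of_le ih

-- pass 1: cut the lines into plain lines and alarm segments
def pvSegment : List String → List PvSeg
  | [] => []
  | l :: rest =>
    if PySem.Str.isIn pvMark l then
      let p := pvTakeBlock (pvIndentOf l) rest
      PvSeg.alarm l p.1 :: pvSegment p.2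
    else PvSeg.plain l :: pvSegment rest
termination_by ls => ls.length
decreasing_by
  · exact Nat.lt_succ_of_le (pvTakeBlock_rest_le _ _)
  · simp

-- pass 2 inner loop: drop every TreatMissingData line after the first
def pvDedup (seen : Bool) : List String → List String
  | [] => []
  | l :: rest =>
    if PySem.Str.isIn "TreatMissingData:" l then
      if seen then pvDedup seen rest else l :: pvDedup true rest
    else l :: pvDedup seen rest

def pvRender : PvSeg → List String
  | .plain l => [l]
  | .alarm h b => h :: pvDedup false b

def fix_cloudformation_duplicates_alt (content : String) : String :=
  PySem.Str.join "\n" ((pvSegment (pvSplitLines content)).flatMap pvRender)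

-- ===== PRECONDITION & SPEC =====
def Spec_fix_cloudformation_duplicates (content : String) (out : String) : Prop := out = fix_cloudformation_duplicates_alt content
instance (content : String) (out : String) : Decidable (Spec_fix_cloudformation_duplicates content out) := by unfold Spec_fix_cloudformation_duplicates; infer_instance

-- ===== CLAIM (what is proved, stated in full; the proofs are below) =====
def Claim_equal_fix_cloudformation_duplicates : Prop := ∀ (content : String), Dom_fix_cloudformation_duplicates content → Spec_fix_cloudformation_duplicates content (fix_cloudformation_duplicates content)

-- ===== LEMMAS AND PROOFS =====

theorem pvStep_false (s : Bool) (i : Int) (l : String) : pvStep false s i l = (false, s) := by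
  simp [pvStep]

theorem pvStep_true (seen : Bool) (ind : Int) (l : String) :
    pvStep true seen ind l = if pvCloses ind l then (false, false) else (true, seen) := by
  unfold pvStep pvCloses
  by_cases h1 : (PySem.Str.strip l != "") = true <;>
    by_cases h2 : (!PySem.Str.startswith (PySem.Str.strip l) "#") = true <;>
      by_cases h3 : (decide (pvIndentOf l ≤ ind)) = true <;>
        by_cases h4 : (!(PySem.Str.isIn "Properties:" l)) = true <;>
          simp_all

theorem goA_cons (inAlarm seen : Bool) (alarmIndent : Int) (line : String) (rest : List String) :
    goA inAlarm seen alarmIndent (line :: rest) =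
      if PySem.Str.isIn pvMark line then
        line :: goA true false (pvIndentOf line) rest
      else
        let st := pvStep inAlarm seen alarmIndent line
        if st.1 && PySem.Str.isIn "TreatMissingData:" line then
          if st.2 then goA st.1 st.2 alarmIndent rest
          else line :: goA st.1 true alarmIndent rest
        else line :: goA st.1 st.2 alarmIndent rest := rfl

-- outside an alarm resource, A's loop ignores seen and alarmIndent
theorem goA_false_congr (s : Bool) (i : Int) (ls : List String) :
    goA false s i ls = goA false false 0 ls := by
  induction ls generalizing s i with
  | nil => rfl
  | cons l rest ih =>
    rw [goA_cons, goA_cons, pvStep_false, pvStep_false]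
    by_cases hm : PySem.Str.isIn pvMark l
    · rw [if_pos hm, if_pos hm]
    · rw [if_neg hm, if_neg hm]
      simp only [Bool.false_and, Bool.false_eq_true, if_false]
      rw [ih, ih]

-- inside an alarm block, A's loop deduplicates the block body then continues outside
theorem goA_true_eq (ind : Int) (ls : List String) (seen : Bool) :
    goA true seen ind ls =
      pvDedup seen (pvTakeBlock ind ls).1 ++ goA false false 0 (pvTakeBlock ind ls).2 := by
  induction ls generalizing seen with
  | nil => simp [goA, pvTakeBlock, pvDedup]
  | cons l rest ih =>
    rw [goA_cons]
    by_cases hm : PySem.Str.isIn pvMark l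
    · rw [if_pos hm]
      simp only [pvTakeBlock, hm, Bool.true_or, if_true, pvDedup, List.nil_append]
      rw [goA_cons, if_pos hm]
    · rw [if_neg hm, pvStep_true]
      by_cases hc : pvCloses ind l = true
      · rw [if_pos hc]
        simp only [Bool.false_and, Bool.false_eq_true, if_false]
        simp only [pvTakeBlock, hm, hc, Bool.false_or, if_true, pvDedup, List.nil_append]
        rw [goA_cons, if_neg hm, pvStep_false]
        simp only [Bool.false_and, Bool.false_eq_true, if_false]
        rw [goA_false_congr]
      · rw [if_neg hc]
        have hm' : PySem.Str.isIn pvMark l = false := by simpa using hm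
        simp only [pvTakeBlock, hm', hc, Bool.or_self, Bool.false_eq_true, if_false]
        by_cases ht : PySem.Str.isIn "TreatMissingData:" l
        · cases seen with
          | true =>
            simp only [ht, Bool.and_true, if_true]
            rw [ih]
            simp only [pvDedup, ht, if_true]
          | false =>
            simp only [ht, Bool.and_true, if_true, Bool.false_eq_true, if_false]
            rw [ih]
            simp only [pvDedup, ht, if_true, Bool.false_eq_true, if_false, List.cons_append]
        · have ht' : PySem.Str.isIn "TreatMissingData:" l = false := by simpa using ht
          simp only [ht', Bool.and_false, Bool.false_eq_true, if_false]
          rw [ih]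
          simp only [pvDedup, ht', Bool.false_eq_true, if_false, List.cons_append]

-- A's loop outside an alarm equals B's segment-then-dedup pipeline
theorem goA_eq_segment (ls : List String) :
    goA false false 0 ls = (pvSegment ls).flatMap pvRender := by
  induction ls using pvSegment.induct with
  | case1 => simp [goA, pvSegment]
  | case2 l rest hm p ih =>
    rw [goA_cons, if_pos hm, goA_true_eq]
    rw [pvSegment, if_pos hm]
    rw [show goA false false 0 (pvTakeBlock (pvIndentOf l) rest).2 =
          List.flatMap pvRender (pvSegment (pvTakeBlock (pvIndentOf l) rest).2) from ih]
    simp [pvRender]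
  | case3 l rest hm ih =>
    rw [goA_cons, if_neg hm, pvStep_false]
    rw [pvSegment, if_neg hm]
    simp only [Bool.false_and, Bool.false_eq_true, if_false]
    rw [ih]
    simp [pvRender]

-- ===== VERDICT (by name: the statement is the Claim_ definition above) =====
theorem fix_cloudformation_duplicates_spec : Claim_equal_fix_cloudformation_duplicates := by
  intro content _
  unfold Spec_fix_cloudformation_duplicates fix_cloudformation_duplicates fix_cloudformation_duplicates_alt
  rw [goA_eq_segment]
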